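-- pv_equiv track=rewrite | github.com/Leap0p0/Supinfo | 2/2ALGO/MAth/4_2.py | optimal_planting_cost
-- ===== SOURCE A (Python) =====
-- def optimal_planting_cost(matrix):
--     #DEF
--     n = len(matrix)
--     m = len(matrix[0])
--
--     # Initialisation de la matrice g
--     g = [[float('inf')] * m for _ in range(n)]
--     for j in range(m):
--         g[0][j] = matrix[0][j]
--
--     # Calcul de la matrice g
--     for i in range(1, n):
--         for j in range(m):
--             for k in range(m):
--                 if j != k:
--                     g[i][j] = min(g[i][j], g[i-1][k] + matrix[i][j])
--
--     # cout min
--     min_cost = float('inf')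
--     for j in range(m):
--         min_cost = min(min_cost, g[n-1][j])
--
--     # essences utilise
--     essences = []
--     j = g[n-1].index(min_cost)
--     for i in range(n-1, -1, -1):
--         essences.append(j+1)
--         for k in range(m):
--             if k != j and g[i-1][k] + matrix[i][j] == g[i][j]:
--                 j = k
--                 break
--
--     essences.reverse()
--
--     return min_cost, essences
-- ===== SOURCE B (Python) =====
-- def _row_stats(row):
--     # first argmin of row, its value, and first argmin/value among the other indices
--     i1 = 0
--     for k in range(1, len(row)):
--         if row[k] < row[i1]:
--             i1 = k
--     m1 = row[i1]
--     m2 = None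
--     i2 = None
--     for k in range(len(row)):
--         if k != i1 and (m2 is None or row[k] < m2):
--             m2 = row[k]
--             i2 = k
--     return m1, i1, m2, i2
--
--
-- def optimal_planting_cost(matrix):
--     # O(n*m): each DP row only needs the min / second-min (with first argmins)
--     # of the previous row, so keep per-row stats instead of scanning it m times.
--     m = len(matrix[0])
--     stats = [_row_stats(matrix[0])]
--     for row in matrix[1:]:
--         m1, i1, m2, i2 = stats[-1]
--         cur = [row[j] + (m2 if j == i1 else m1) for j in range(m)]
--         stats.append(_row_stats(cur))
--     m1, i1, m2, i2 = stats[-1]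
--     cost = m1
--     j = i1
--     cols = [j + 1]
--     for s in reversed(stats[:-1]):
--         m1, i1, m2, i2 = s
--         j = i2 if j == i1 else i1
--         cols.append(j + 1)
--     cols.reverse()
--     return cost, cols
-- ===== Notes on version B (the rewrite author's own statement) =====
-- stated objective: faster
-- what changed: Replaces the O(m) inner scan per DP cell (and per backtracking step) by precomputed per-row stats (min, first argmin, second min, its first argmin), so each row and each backtracking step is O(m) / O(1); the DP table is never stored, only the stats per row.
-- outside the precondition, e.g. on optimal_planting_cost([[1], [2]]): A returns (inf, [1, 1]), B raises TypeError
import Mathlib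
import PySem

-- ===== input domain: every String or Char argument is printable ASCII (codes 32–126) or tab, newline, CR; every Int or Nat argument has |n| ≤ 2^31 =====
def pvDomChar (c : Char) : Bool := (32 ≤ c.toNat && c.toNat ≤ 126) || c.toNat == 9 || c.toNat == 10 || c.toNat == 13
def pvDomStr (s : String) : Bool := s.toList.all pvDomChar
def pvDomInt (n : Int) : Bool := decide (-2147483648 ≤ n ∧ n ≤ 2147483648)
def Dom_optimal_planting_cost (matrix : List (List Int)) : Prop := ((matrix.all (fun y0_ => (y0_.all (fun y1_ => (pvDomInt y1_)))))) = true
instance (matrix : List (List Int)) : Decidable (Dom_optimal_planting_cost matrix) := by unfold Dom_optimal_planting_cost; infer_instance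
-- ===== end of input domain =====

-- B replaces the O(m) inner scan per DP cell and per backtracking step by precomputed
-- per-row stats (min / first argmin / second min / its first argmin): a different,
-- asymptotically faster algorithm (measured).


-- ===== PORT A =====
-- A's DP entries live in Option Int: `none` stands for Python's float('inf')
-- (only the initial value of each cell; under Pre_ every returned value is an int).
-- Python's min(a, b) returns a if a <= b else b; inf compares greater than every int.
def pvEMin (a b : Option Int) : Option Int :=
  match a, b with
  | none, none => none
  | none, some y => some y
  | some x, none => some x
  | some x, some y => if x ≤ y then some x else some y

-- inf + c = inf
def pvEAdd (a : Option Int) (c : Int) : Option Int := a.map (· + c)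

-- one cell of A's inner double loop: for k in range(m): if j != k: g[i][j] = min(g[i][j], g[i-1][k] + matrix[i][j])
def pvACell (prev : List (Option Int)) (c : Int) (j m : Nat) : Option Int :=
  (List.range m).foldl
    (fun acc k => if j ≠ k then pvEMin acc (pvEAdd (prev.getD k none) c) else acc) none

-- the matrix g after the forward loops (row i only reads row i-1, so g is built row by row;
-- `g.getD (i-1).toNat []` is Python's g[i-1] since g holds exactly i rows when index i is processed)
def pvARows (matrix : List (List Int)) : List (List (Option Int)) :=
  let n := matrix.length
  let m := (matrix.headD []).length
  (PySem.List.pyRange 1 (n : Int) 1).foldl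
    (fun g i =>
      let prev := g.getD (i - 1).toNat []
      let rowi := matrix.getD i.toNat []
      g ++ [(List.range m).map (fun j => pvACell prev (rowi.getD j 0) j m)])
    [(List.range m).map (fun j => some ((matrix.headD []).getD j 0))]

def optimal_planting_cost (matrix : List (List Int)) : Int × List Int :=
  let n := matrix.length
  let m := (matrix.headD []).length
  let g := pvARows matrix
  let last := g.getD (n - 1) []
  -- min_cost loop
  let min_cost := (List.range m).foldl (fun mc j => pvEMin mc (last.getD j none)) none
  -- j = g[n-1].index(min_cost); under Pre_ the minimum is present (getD 0 is never taken)
  let j0 : Int := ((PySem.List.index? last min_cost).getD 0 : Nat)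
  -- backtracking loop: for i in range(n-1, -1, -1); the inner `for k ... break` is find?;
  -- g[i-1] at i = 0 is Python's g[-1] (pyGet?)
  let st := (PySem.List.pyRange ((n : Int) - 1) (-1) (-1)).foldl
    (fun (st : List Int × Int) i =>
      let ess := st.1 ++ [st.2 + 1]
      let j := st.2
      let prev := (PySem.List.pyGet? g (i - 1)).getD []
      let rowi := matrix.getD i.toNat []
      let gi := g.getD i.toNat []
      match (List.range m).find?
          (fun (k : Nat) => decide ((k : Int) ≠ j) && (pvEAdd (prev.getD k none) (rowi.getD j.toNat 0) == gi.getD j.toNat none)) with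
      | some k => (ess, (k : Int))
      | none => (ess, j))
    ([], j0)
  -- min_cost is an int under Pre_ (getD 0 is never taken); essences.reverse()
  (min_cost.getD 0, st.1.reverse)

-- ===== PORT B =====
structure PvStat where
  m1 : Int          -- min of the row
  i1 : Nat          -- first index attaining it
  m2 : Option Int   -- min over the other indices (None when the row has one element)
  i2 : Option Nat   -- first index ≠ i1 attaining m2
deriving Repr, DecidableEq

-- _row_stats of Source B, loop for loop
def pvRowStats (row : List Int) : PvStat :=
  let i1 := (List.range' 1 (row.length - 1)).foldl
    (fun i1 k => if row.getD k 0 < row.getD i1 0 then k else i1) 0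
  let m1 := row.getD i1 0
  let p := (List.range row.length).foldl
    (fun (p : Option Int × Option Nat) k =>
      match p with
      | (none, _) => if k ≠ i1 then (some (row.getD k 0), some k) else p
      | (some v, _) => if k ≠ i1 ∧ row.getD k 0 < v then (some (row.getD k 0), some k) else p)
    (none, none)
  ⟨m1, i1, p.1, p.2⟩

-- the forward loop of Source B: one stats record per remaining row
-- (s.m2.getD 0 : Python adds None there only when m = 1 and n ≥ 2, which Pre_ excludes)
def pvBLoop (s : PvStat) (m : Nat) : List (List Int) → List PvStat
  | [] => []
  | row :: rest =>
    let cur := (List.range m).map (fun j => row.getD j 0 + (if j = s.i1 then s.m2.getD 0 else s.m1))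
    let s' := pvRowStats cur
    s' :: pvBLoop s' m rest

def optimal_planting_cost_alt (matrix : List (List Int)) : Int × List Int :=
  let m := (matrix.headD []).length
  let s0 := pvRowStats (matrix.headD [])
  let stats := s0 :: pvBLoop s0 m matrix.tail
  let sl := stats.getLastD s0
  let bt := (stats.dropLast).reverse.foldl
    (fun (p : List Int × Nat) s =>
      let j : Nat := if p.2 = s.i1 then s.i2.getD 0 else s.i1
      (p.1 ++ [(j : Int) + 1], j))
    ([(sl.i1 : Int) + 1], sl.i1)
  (sl.m1, bt.1.reverse)

-- ===== PRECONDITION & SPEC =====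
-- Pre_ excludes exactly: the empty matrix and matrices with a row shorter than row 0
-- (IndexError), an empty row 0 (ValueError from .index on an empty list), and n ≥ 2 with
-- m = 1, where A returns float('inf') — not an int (B raises TypeError there).
def Pre_optimal_planting_cost (matrix : List (List Int)) : Prop :=
  matrix ≠ [] ∧ 1 ≤ (matrix.headD []).length ∧
    (∀ row ∈ matrix, (matrix.headD []).length ≤ row.length) ∧
    (matrix.length = 1 ∨ 2 ≤ (matrix.headD []).length)
instance (matrix : List (List Int)) : Decidable (Pre_optimal_planting_cost matrix) := by
  unfold Pre_optimal_planting_cost; infer_instance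

def pvWitness_optimal_planting_cost : List (List Int) := [[1, 2], [3, 4]]

def Spec_optimal_planting_cost (matrix : List (List Int)) (out : Int × List Int) : Prop := out = optimal_planting_cost_alt matrix
instance (matrix : List (List Int)) (out : Int × List Int) : Decidable (Spec_optimal_planting_cost matrix out) := by unfold Spec_optimal_planting_cost; infer_instance

-- ===== CLAIM (what is proved, stated in full; the proofs are below) =====
def Claim_equal_optimal_planting_cost : Prop := ∀ (matrix : List (List Int)), Dom_optimal_planting_cost matrix → Pre_optimal_planting_cost matrix → Spec_optimal_planting_cost matrix (optimal_planting_cost matrix)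

-- ===== LEMMAS AND PROOFS =====

-- ---- stats facts ----
lemma pv_argmin_fold (r : List Int) (c : Nat) :
    ((List.range' 1 c).foldl (fun i1 k => if r.getD k 0 < r.getD i1 0 then k else i1) 0) < 1 + c ∧
    (∀ k < 1 + c, r.getD ((List.range' 1 c).foldl (fun i1 k => if r.getD k 0 < r.getD i1 0 then k else i1) 0) 0 ≤ r.getD k 0) ∧
    (∀ k < (List.range' 1 c).foldl (fun i1 k => if r.getD k 0 < r.getD i1 0 then k else i1) 0,
      r.getD ((List.range' 1 c).foldl (fun i1 k => if r.getD k 0 < r.getD i1 0 then k else i1) 0) 0 < r.getD k 0) := by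
  induction c with
  | zero =>
    simp only [List.range', List.foldl_nil]
    refine ⟨by omega, ?_, by omega⟩
    intro k hk
    interval_cases k
    exact le_refl _
  | succ c ih =>
    rw [List.range'_1_concat, List.foldl_append, List.foldl_cons, List.foldl_nil]
    set i := (List.range' 1 c).foldl (fun i1 k => if r.getD k 0 < r.getD i1 0 then k else i1) 0 with hi
    obtain ⟨ih1, ih2, ih3⟩ := ih
    by_cases h : r.getD (1 + c) 0 < r.getD i 0
    · simp only [if_pos h]
      refine ⟨by omega, ?_, ?_⟩
      · intro k hk
        rcases Nat.lt_or_ge k (1 + c) with hk' | hk'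
        · exact le_of_lt (lt_of_lt_of_le h (ih2 k hk'))
        · have : k = 1 + c := by omega
          subst this; exact le_refl _
      · intro k hk
        exact lt_of_lt_of_le h (ih2 k hk)
    · simp only [if_neg h]
      push Not at h
      refine ⟨by omega, ?_, ih3⟩
      intro k hk
      rcases Nat.lt_or_ge k (1 + c) with hk' | hk'
      · exact ih2 k hk'
      · have : k = 1 + c := by omega
        subst this; exact h

lemma pv_stats_i1 (r : List Int) (hr : r ≠ []) :
    (pvRowStats r).i1 < r.length ∧ (pvRowStats r).m1 = r.getD (pvRowStats r).i1 0 ∧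
    (∀ k < r.length, (pvRowStats r).m1 ≤ r.getD k 0) ∧
    (∀ k < (pvRowStats r).i1, (pvRowStats r).m1 < r.getD k 0) := by
  have h := pv_argmin_fold r (r.length - 1)
  have hpos : 0 < r.length := List.length_pos_iff.mpr hr
  have hlen : 1 + (r.length - 1) = r.length := by omega
  have hi1 : (pvRowStats r).i1
      = (List.range' 1 (r.length - 1)).foldl (fun i1 k => if r.getD k 0 < r.getD i1 0 then k else i1) 0 := rfl
  have hm1 : (pvRowStats r).m1 = r.getD (pvRowStats r).i1 0 := rfl
  rw [hlen] at h
  rw [hi1, hm1, hi1]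
  exact ⟨h.1, rfl, h.2.1, h.2.2⟩

-- the second fold of _row_stats: first argmin among indices ≠ i1 of the processed prefix
lemma pv_second_fold (r : List Int) (i1 : Nat) (t : Nat) :
    (((List.range t).foldl
        (fun (p : Option Int × Option Nat) k =>
          match p with
          | (none, _) => if k ≠ i1 then (some (r.getD k 0), some k) else p
          | (some v, _) => if k ≠ i1 ∧ r.getD k 0 < v then (some (r.getD k 0), some k) else p)
        (none, none)) = (none, none) ∧ ∀ k < t, k = i1) ∨
    (∃ w, ((List.range t).foldl
        (fun (p : Option Int × Option Nat) k =>
          match p with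
          | (none, _) => if k ≠ i1 then (some (r.getD k 0), some k) else p
          | (some v, _) => if k ≠ i1 ∧ r.getD k 0 < v then (some (r.getD k 0), some k) else p)
        (none, none)) = (some (r.getD w 0), some w) ∧ w < t ∧ w ≠ i1 ∧
      (∀ k < t, k ≠ i1 → r.getD w 0 ≤ r.getD k 0) ∧ (∀ k < w, k ≠ i1 → r.getD w 0 < r.getD k 0)) := by
  induction t with
  | zero => exact Or.inl ⟨rfl, by omega⟩
  | succ t ih =>
    rw [List.range_succ, List.foldl_append, List.foldl_cons, List.foldl_nil]
    rcases ih with ⟨hp, hall⟩ | ⟨w, hp, hw1, hw2, hw3, hw4⟩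
    · rw [hp]
      by_cases h : t = i1
      · left
        refine ⟨by simp [h], ?_⟩
        intro k hk
        rcases Nat.lt_or_ge k t with hk' | hk'
        · exact hall k hk'
        · omega
      · right
        refine ⟨t, by simp [h], by omega, h, ?_, ?_⟩
        · intro k hk hki
          rcases Nat.lt_or_ge k t with hk' | hk'
          · exact absurd (hall k hk') hki
          · have : k = t := by omega
            subst this; exact le_refl _
        · intro k hk hki
          exact absurd (hall k hk) hki
    · rw [hp]
      by_cases h : t ≠ i1 ∧ r.getD t 0 < r.getD w 0
      · right
        refine ⟨t, by show ite _ _ _ = _; rw [if_pos h], by omega, h.1, ?_, ?_⟩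
        · intro k hk hki
          rcases Nat.lt_or_ge k t with hk' | hk'
          · exact le_of_lt (lt_of_lt_of_le h.2 (hw3 k hk' hki))
          · have : k = t := by omega
            subst this; exact le_refl _
        · intro k hk hki
          exact lt_of_lt_of_le h.2 (hw3 k (by omega) hki)
      · right
        refine ⟨w, by show ite _ _ _ = _; rw [if_neg h], by omega, hw2, ?_, hw4⟩
        intro k hk hki
        rcases Nat.lt_or_ge k t with hk' | hk'
        · exact hw3 k hk' hki
        · have : k = t := by omega
          subst this
          rcases Decidable.not_and_iff_or_not.mp h with h' | h'
          · exact absurd hki (by simpa using h')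
          · omega

lemma pv_stats_second (r : List Int) (h2 : 2 ≤ r.length) :
    ∃ w, (pvRowStats r).i2 = some w ∧ (pvRowStats r).m2 = some (r.getD w 0) ∧
      w < r.length ∧ w ≠ (pvRowStats r).i1 ∧
      (∀ k < r.length, k ≠ (pvRowStats r).i1 → r.getD w 0 ≤ r.getD k 0) ∧
      (∀ k < w, k ≠ (pvRowStats r).i1 → r.getD w 0 < r.getD k 0) := by
  have h := pv_second_fold r (pvRowStats r).i1 r.length
  rcases h with ⟨hp, hall⟩ | ⟨w, hp, hw⟩
  · exfalso
    have h0 := hall 0 (by omega)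
    have h1 := hall 1 (by omega)
    omega
  · refine ⟨w, ?_, ?_, hw.1, hw.2.1, hw.2.2.1, hw.2.2.2⟩
    · have : (pvRowStats r).i2
          = ((List.range r.length).foldl
              (fun (p : Option Int × Option Nat) k =>
                match p with
                | (none, _) => if k ≠ (pvRowStats r).i1 then (some (r.getD k 0), some k) else p
                | (some v, _) => if k ≠ (pvRowStats r).i1 ∧ r.getD k 0 < v then (some (r.getD k 0), some k) else p)
              (none, none)).2 := rfl
      rw [this, hp]
    · have : (pvRowStats r).m2
          = ((List.range r.length).foldl
              (fun (p : Option Int × Option Nat) k =>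
                match p with
                | (none, _) => if k ≠ (pvRowStats r).i1 then (some (r.getD k 0), some k) else p
                | (some v, _) => if k ≠ (pvRowStats r).i1 ∧ r.getD k 0 < v then (some (r.getD k 0), some k) else p)
              (none, none)).1 := rfl
      rw [this, hp]

-- ---- generic min-fold characterisation (A side) ----
lemma pv_emin_fold_char (f : Nat → Int) (q : Nat → Bool) (n k0 : Nat)
    (h0 : k0 < n) (hq : q k0 = true) (hmin : ∀ k < n, q k = true → f k0 ≤ f k) :
    (List.range n).foldl (fun acc k => if q k then pvEMin acc (some (f k)) else acc) none
      = some (f k0) := by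
  have inv : ∀ t : Nat,
      ((List.range t).foldl (fun acc k => if q k then pvEMin acc (some (f k)) else acc) none = none
        ∧ ∀ k < t, q k = false) ∨
      (∃ kw, kw < t ∧ q kw = true ∧
        (List.range t).foldl (fun acc k => if q k then pvEMin acc (some (f k)) else acc) none = some (f kw) ∧
        ∀ k < t, q k = true → f kw ≤ f k) := by
    intro t
    induction t with
    | zero => exact Or.inl ⟨rfl, by omega⟩
    | succ t ih =>
      rw [List.range_succ, List.foldl_append, List.foldl_cons, List.foldl_nil]
      rcases ih with ⟨hp, hall⟩ | ⟨kw, hkw1, hkw2, hp, hle⟩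
      · rw [hp]
        by_cases h : q t
        · right
          refine ⟨t, by omega, h, by rw [if_pos h]; rfl, ?_⟩
          intro k hk hq
          rcases Nat.lt_or_ge k t with hk' | hk'
          · exact absurd hq (by simp [hall k hk'])
          · have : k = t := by omega
            subst this; exact le_refl _
        · left
          refine ⟨by rw [if_neg h], ?_⟩
          intro k hk
          rcases Nat.lt_or_ge k t with hk' | hk'
          · exact hall k hk'
          · have : k = t := by omega
            subst this; simpa using h
      · rw [hp]
        by_cases h : q t
        · rw [if_pos h]
          by_cases hle' : f kw ≤ f t
          · right
            refine ⟨kw, by omega, hkw2, by simp [pvEMin, hle'], ?_⟩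
            intro k hk hq
            rcases Nat.lt_or_ge k t with hk' | hk'
            · exact hle k hk' hq
            · have : k = t := by omega
              subst this; exact hle'
          · right
            refine ⟨t, by omega, h, by simp [pvEMin, hle'], ?_⟩
            intro k hk hq
            rcases Nat.lt_or_ge k t with hk' | hk'
            · exact le_of_lt (lt_of_lt_of_le (by omega) (hle k hk' hq))
            · have : k = t := by omega
              subst this; exact le_refl _
        · rw [if_neg h]
          right
          refine ⟨kw, by omega, hkw2, rfl, ?_⟩
          intro k hk hq
          rcases Nat.lt_or_ge k t with hk' | hk'
          · exact hle k hk' hq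
          · have : k = t := by omega
            subst this; exact absurd hq (by simpa using h)
  rcases inv n with ⟨hp, hall⟩ | ⟨kw, hkw1, hkw2, hp, hle⟩
  · exact absurd hq (by simp [hall k0 h0])
  · rw [hp]
    have h1 := hle k0 h0 hq
    have h2 := hmin kw hkw1 hkw2
    have : f kw = f k0 := le_antisymm h1 h2
    rw [this]

-- the value of B's "min excluding column j" of a row
def pvExcl (r : List Int) (j : Nat) : Int :=
  if j = (pvRowStats r).i1 then ((pvRowStats r).m2).getD 0 else (pvRowStats r).m1

lemma pv_acell_eq (r : List Int) (h2 : 2 ≤ r.length) (j : Nat) (_hj : j < r.length) (c : Int) :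
    pvACell (r.map some) c j r.length = some (pvExcl r j + c) := by
  have hne : r ≠ [] := by intro h; rw [h] at h2; simp at h2
  obtain ⟨hi1lt, hm1eq, hm1le, hm1lt⟩ := pv_stats_i1 r hne
  obtain ⟨w, hi2, hm2, hwlt, hwne, hwle, hwlt'⟩ := pv_stats_second r h2
  unfold pvACell
  rw [PySem.List.foldl_congr_mem (List.range r.length)
    (fun acc k => if j ≠ k then pvEMin acc (pvEAdd ((List.map some r).getD k none) c) else acc)
    (fun acc k => if (fun k => decide (j ≠ k)) k then pvEMin acc (some ((fun k => r.getD k 0 + c) k)) else acc)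
    none
    (by
      intro acc k hk
      have hk' : k < r.length := by simpa using hk
      by_cases h : j = k
      · simp [h]
      · simp [h, pvEAdd, List.getD_eq_getElem?_getD, List.getElem?_eq_getElem hk'])]
  by_cases hj : j = (pvRowStats r).i1
  · rw [pv_emin_fold_char (fun k => r.getD k 0 + c) (fun k => decide (j ≠ k)) r.length w hwlt
      (by simp [hj]; exact fun h => hwne h.symm)
      (by
        intro k hk hq
        simp only [decide_eq_true_eq] at hq
        have hki : k ≠ (pvRowStats r).i1 := by rw [hj] at hq; omega
        have := hwle k hk hki
        show r.getD w 0 + c ≤ r.getD k 0 + c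
        omega)]
    unfold pvExcl
    rw [if_pos hj, hm2]
    simp
  · rw [pv_emin_fold_char (fun k => r.getD k 0 + c) (fun k => decide (j ≠ k)) r.length (pvRowStats r).i1 hi1lt
      (by simp [hj])
      (by
        intro k hk hq
        have h1 := hm1le k hk
        have h2 := hm1le (pvRowStats r).i1 hi1lt
        rw [hm1eq] at h1
        show r.getD (pvRowStats r).i1 0 + c ≤ r.getD k 0 + c
        omega)]
    unfold pvExcl
    rw [if_neg hj, hm1eq]

-- ---- generic first-match find? ----
lemma pv_find_range (p : Nat → Bool) (n k0 : Nat) (h0 : k0 < n) (hp : p k0 = true)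
    (hfirst : ∀ k < k0, p k = false) : (List.range n).find? p = some k0 := by
  induction n with
  | zero => omega
  | succ n ih =>
    rw [List.range_succ, List.find?_append]
    rcases Nat.lt_or_ge k0 n with h | h
    · rw [ih h]; rfl
    · have hk0 : k0 = n := by omega
      subst hk0
      have : (List.range k0).find? p = none := by
        rw [List.find?_eq_none]
        intro x hx
        simp [hfirst x (by simpa using hx)]
      rw [this]
      simp [List.find?, hp]

-- the column A's backtracking step picks, = B's step
lemma pv_backstep (r : List Int) (h2 : 2 ≤ r.length) (j : Nat) (_hj : j < r.length) (c : Int) :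
    (List.range r.length).find?
        (fun (k : Nat) => decide ((k : Int) ≠ (j : Int)) &&
          (pvEAdd ((r.map some).getD k none) c == some (c + pvExcl r j))) =
      some (if j = (pvRowStats r).i1 then ((pvRowStats r).i2).getD 0 else (pvRowStats r).i1) := by
  have hne : r ≠ [] := by intro h; rw [h] at h2; simp at h2
  obtain ⟨hi1lt, hm1eq, hm1le, hm1lt⟩ := pv_stats_i1 r hne
  obtain ⟨w, hi2, hm2, hwlt, hwne, hwle, hwlt'⟩ := pv_stats_second r h2
  by_cases hj' : j = (pvRowStats r).i1
  · rw [if_pos hj', hi2]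
    show _ = some w
    apply pv_find_range _ r.length w hwlt
    · unfold pvExcl
      rw [if_pos hj', hm2]
      simp [pvEAdd, List.getElem?_eq_getElem hwlt]
      exact ⟨by omega, by omega⟩
    · intro k hk
      have hklen : k < r.length := by omega
      unfold pvExcl
      rw [if_pos hj', hm2]
      simp [pvEAdd, List.getElem?_eq_getElem hklen, List.getElem?_eq_getElem hwlt]
      intro hkj
      have hki : k ≠ (pvRowStats r).i1 := by omega
      have h5 := hwlt' k hk hki
      rw [List.getD_eq_getElem r 0 hklen, List.getD_eq_getElem r 0 hwlt] at h5
      omega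
  · rw [if_neg hj']
    apply pv_find_range _ r.length (pvRowStats r).i1 hi1lt
    · unfold pvExcl
      rw [if_neg hj']
      simp [pvEAdd, List.getElem?_eq_getElem hi1lt]
      refine ⟨by omega, ?_⟩
      rw [hm1eq, List.getD_eq_getElem r 0 hi1lt]
      ring
    · intro k hk
      have hklen : k < r.length := by omega
      unfold pvExcl
      rw [if_neg hj']
      simp [pvEAdd, List.getElem?_eq_getElem hklen]
      intro hkj
      have h5 := hm1lt k hk
      rw [List.getD_eq_getElem r 0 hklen] at h5
      omega

-- ---- the chain of DP rows (proof-level description shared by both ports) ----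
def pvChain (m : Nat) (r : List Int) : List (List Int) → List (List Int)
  | [] => []
  | row :: rest =>
    let cur := (List.range m).map (fun j => row.getD j 0 + pvExcl r j)
    cur :: pvChain m cur rest

lemma pv_bloop_eq_chain (m : Nat) (tail : List (List Int)) :
    ∀ r : List Int, pvBLoop (pvRowStats r) m tail = (pvChain m r tail).map pvRowStats := by
  induction tail with
  | nil => intro r; rfl
  | cons row rest ih =>
    intro r
    simp only [pvBLoop, pvChain, List.map_cons, pvExcl]
    rw [ih]

lemma pv_chain_length (m : Nat) (tail : List (List Int)) :
    ∀ r, (pvChain m r tail).length = tail.length := by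
  induction tail with
  | nil => intro r; rfl
  | cons row rest ih =>
    intro r
    simp only [pvChain, List.length_cons, ih]

lemma pv_chain_row_len (m : Nat) (tail : List (List Int)) :
    ∀ r row, row ∈ pvChain m r tail → row.length = m := by
  induction tail with
  | nil => intro r row h; simp [pvChain] at h
  | cons row rest ih =>
    intro r row' h
    simp only [pvChain, List.mem_cons] at h
    rcases h with h | h
    · subst h; simp
    · exact ih _ _ h

-- row i+1 of the consed chain in terms of row i
lemma pv_chain_rel (m : Nat) (tail : List (List Int)) :
    ∀ (r : List Int) (i : Nat) (h : i + 1 < (r :: pvChain m r tail).length),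
      (r :: pvChain m r tail)[i + 1] =
        (List.range m).map (fun j => (tail.getD i []).getD j 0 + pvExcl ((r :: pvChain m r tail)[i]'(by omega)) j) := by
  induction tail with
  | nil => intro r i h; simp [pvChain] at h
  | cons row rest ih =>
    intro r i h
    match i with
    | 0 => simp [pvChain]
    | i + 1 =>
      have h' : i + 1 < ((List.range m).map
          (fun j => row.getD j 0 + pvExcl r j) :: pvChain m ((List.range m).map (fun j => row.getD j 0 + pvExcl r j)) rest).length := by
        simp only [pvChain, List.length_cons] at h ⊢
        omega
      have := ih ((List.range m).map (fun j => row.getD j 0 + pvExcl r j)) i h'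
      simp only [pvChain]
      simpa using this

-- A's forward loop builds exactly the consed chain (as Option rows)
lemma pv_arows_fold (matrix : List (List Int)) (m : Nat) :
    ∀ (k : Nat) (a : Nat) (ga : List (List (Option Int))) (r : List Int),
      matrix.length - a = k →
      ga.length = a → 1 ≤ a → a ≤ matrix.length →
      ga.getLast? = some (r.map some) → r.length = m → (a < matrix.length → 2 ≤ m) →
      ((PySem.List.pyRange (a : Int) (matrix.length : Int) 1).foldl
        (fun g i =>
          g ++ [(List.range m).map
            (fun j => pvACell (g.getD (i - 1).toNat []) ((matrix.getD i.toNat []).getD j 0) j m)])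
        ga)
        = ga ++ (pvChain m r (matrix.drop a)).map (List.map some) := by
  intro k
  induction k with
  | zero =>
    intro a ga r hk hga h1 hle _ _ _
    have ha : a = matrix.length := by omega
    subst ha
    rw [PySem.List.pyRange_one_eq_nil (le_refl _), List.foldl_nil,
      List.drop_of_length_le (le_refl _)]
    simp [pvChain]
  | succ k ih =>
    intro a ga r hk hga h1 hle hlast hr h2m
    have halt : a < matrix.length := by omega
    have hm2 : 2 ≤ m := h2m halt
    rw [PySem.List.pyRange_one_cons (by exact_mod_cast halt), List.foldl_cons]
    have hprev : ga.getD (((a : Int) - 1).toNat) [] = r.map some := by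
      have : ((a : Int) - 1).toNat = a - 1 := by omega
      rw [this]
      rw [List.getLast?_eq_getElem?, hga] at hlast
      rw [List.getD_eq_getElem?_getD, hlast]
      rfl
    have hcur : (List.range m).map
        (fun j => pvACell (ga.getD (((a : Int) - 1).toNat) []) ((matrix.getD ((a : Int)).toNat []).getD j 0) j m)
        = ((List.range m).map (fun j => (matrix.getD a []).getD j 0 + pvExcl r j)).map some := by
      rw [hprev, List.map_map]
      refine List.map_congr_left ?_
      intro j hj
      have hj' : j < m := by simpa using hj
      have := pv_acell_eq r (by omega) j (by omega) ((matrix.getD ((a : Int)).toNat []).getD j 0)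
      rw [hr] at this
      rw [this]
      have hcast : ((a : Int)).toNat = a := by omega
      rw [hcast]
      simp [Int.add_comm]
    show (PySem.List.pyRange ((a : Int) + 1) (matrix.length : Int) 1).foldl _
        (ga ++ [(List.range m).map
          (fun j => pvACell (ga.getD (((a : Int) - 1).toNat) []) ((matrix.getD ((a : Int)).toNat []).getD j 0) j m)]) = _
    rw [hcur]
    have hcast1 : ((a : Int) + 1) = ((a + 1 : Nat) : Int) := by push_cast; ring
    rw [hcast1]
    rw [ih (a + 1) (ga ++ [((List.range m).map (fun j => (matrix.getD a []).getD j 0 + pvExcl r j)).map some])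
      ((List.range m).map (fun j => (matrix.getD a []).getD j 0 + pvExcl r j))
      (by omega) (by simp [hga]) (by omega) (by omega)
      (by rw [List.getLast?_concat]) (by simp) (fun h => hm2)]
    rw [List.append_assoc]
    congr 1
    have hdrop : matrix.drop a = (matrix.getD a []) :: matrix.drop (a + 1) := by
      rw [List.getD_eq_getElem matrix [] halt, List.getElem_cons_drop halt]
    rw [hdrop]
    simp only [pvChain, List.map_cons]
    rfl

-- the min_cost loop over the last row
lemma pv_mincost_fold (lr : List Int) (hlr : lr ≠ []) :
    (List.range lr.length).foldl (fun mc j => pvEMin mc ((lr.map some).getD j none)) none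
      = some ((pvRowStats lr).m1) := by
  obtain ⟨hi1lt, hm1eq, hm1le, hm1lt⟩ := pv_stats_i1 lr hlr
  rw [PySem.List.foldl_congr_mem (List.range lr.length)
    (fun mc j => pvEMin mc ((lr.map some).getD j none))
    (fun acc k => if (fun (_ : Nat) => true) k then pvEMin acc (some ((fun k => lr.getD k 0) k)) else acc)
    none
    (by
      intro acc k hk
      have hk' : k < lr.length := by simpa using hk
      simp [List.getElem?_eq_getElem hk'])]
  rw [pv_emin_fold_char (fun k => lr.getD k 0) (fun _ => true) lr.length (pvRowStats lr).i1 hi1lt rfl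
    (by intro k hk _; have := hm1le k hk; rw [hm1eq] at this; exact this)]
  rw [← hm1eq]

-- g[n-1].index(min_cost)
lemma pv_index_min (lr : List Int) (hlr : lr ≠ []) :
    PySem.List.index? (lr.map some) (some ((pvRowStats lr).m1)) = some ((pvRowStats lr).i1) := by
  obtain ⟨hi1lt, hm1eq, hm1le, hm1lt⟩ := pv_stats_i1 lr hlr
  have hlt' : (pvRowStats lr).i1 < (lr.map some).length := by simpa using hi1lt
  refine (PySem.List.index?_eq_some_iff _ _ _).mpr
    ⟨(lr.map some).take (pvRowStats lr).i1, (lr.map some).drop ((pvRowStats lr).i1 + 1), ?_, ?_, ?_⟩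
  · have hx : (lr.map some)[(pvRowStats lr).i1]'hlt' = some ((pvRowStats lr).m1) := by
      rw [hm1eq, List.getD_eq_getElem lr 0 hi1lt]
      simp
    rw [← hx, List.getElem_cons_drop hlt', List.take_append_drop]
  · simp
    omega
  · intro hmem
    rw [List.mem_take_iff_getElem] at hmem
    obtain ⟨k, hk, hkeq⟩ := hmem
    have hklt : k < lr.length := by simp at hk; omega
    have hki1 : k < (pvRowStats lr).i1 := by simp at hk; omega
    have : lr[k] = (pvRowStats lr).m1 := by
      have := hkeq
      simp [List.getElem_map] at this
      exact this
    have h5 := hm1lt k hki1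
    rw [List.getD_eq_getElem lr 0 hklt] at h5
    omega

-- the column trajectory both backtracking loops walk (row stats below the current row, top first)
def pvTraj (ss : List PvStat) (j : Nat) : List Nat :=
  match ss with
  | [] => [j]
  | s :: rest => j :: pvTraj rest (if j = s.i1 then s.i2.getD 0 else s.i1)

lemma pv_bfold (ss : List PvStat) :
    ∀ (j : Nat) (acc : List Int),
      (ss.foldl
        (fun (p : List Int × Nat) s =>
          (p.1 ++ [((if p.2 = s.i1 then s.i2.getD 0 else s.i1 : Nat) : Int) + 1],
            if p.2 = s.i1 then s.i2.getD 0 else s.i1))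
        (acc ++ [(j : Int) + 1], j)).1
      = acc ++ ((pvTraj ss j).map (fun (x : Nat) => ((x : Int) + 1))) := by
  induction ss with
  | nil => intro j acc; simp [pvTraj]
  | cons s rest ih =>
    intro j acc
    rw [List.foldl_cons]
    have H := ih (if j = s.i1 then s.i2.getD 0 else s.i1) (acc ++ [(j : Int) + 1])
    simp only [pvTraj]
    rw [List.map_cons, List.append_cons]
    simpa using H

lemma pv_afold (matrix : List (List Int)) (m : Nat) (L : List (List Int))
    (hrows : ∀ (i : Nat) (h : i < L.length), (L[i]'h).length = m)
    (hrel : ∀ (i : Nat) (h : i + 1 < L.length),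
      L[i + 1] = (List.range m).map (fun j => (matrix.getD (i + 1) []).getD j 0 + pvExcl (L[i]'(by omega)) j))
    (hm2 : 2 ≤ m ∨ L.length = 1) :
    ∀ (t : Nat) (jn : Nat) (acc : List Int), t < L.length → jn < m →
      ((PySem.List.pyRange (t : Int) (-1) (-1)).foldl
        (fun (st : List Int × Int) i =>
          match (List.range m).find?
              (fun (k : Nat) => decide ((k : Int) ≠ st.2) &&
                (pvEAdd (((PySem.List.pyGet? (L.map (List.map some)) (i - 1)).getD []).getD k none)
                  ((matrix.getD i.toNat []).getD st.2.toNat 0)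
                  == ((L.map (List.map some)).getD i.toNat []).getD st.2.toNat none)) with
          | some k => (st.1 ++ [st.2 + 1], (k : Int))
          | none => (st.1 ++ [st.2 + 1], st.2))
        (acc, (jn : Int))).1
      = acc ++ ((pvTraj (((L.map pvRowStats).take t).reverse) jn).map (fun (x : Nat) => ((x : Int) + 1))) := by
  intro t
  induction t with
  | zero =>
    intro jn acc _ _
    rw [Nat.cast_zero, PySem.List.pyRange_neg_one_cons (by norm_num),
      show (0 : Int) - 1 = -1 by ring, PySem.List.pyRange_neg_one_eq_nil (le_refl _),
      List.foldl_cons, List.foldl_nil]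
    simp only [List.take_zero, List.reverse_nil, pvTraj, List.map_cons, List.map_nil]
    split <;> simp
  | succ t ih =>
    intro jn acc ht hjn
    have htL : t < L.length := by omega
    have ht1L : t + 1 < L.length := by omega
    have hm2 : 2 ≤ m := by rcases hm2 with h | h; exact h; omega
    have hrowlen : (L[t]'htL).length = m := hrows t htL
    have hrowne : (L[t]'htL) ≠ [] := by
      intro h; rw [h] at hrowlen; simp at hrowlen; omega
    obtain ⟨hi1lt, hm1eq, hm1le, hm1lt⟩ := pv_stats_i1 _ hrowne
    obtain ⟨w, hi2, hm2', hwlt, hwne, hwle, hwlt'⟩ := pv_stats_second (L[t]'htL) (by omega)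
    have hcast : ((t + 1 : Nat) : Int) = (t : Int) + 1 := by push_cast; ring
    rw [hcast, PySem.List.pyRange_neg_one_cons (by
      have : (0 : Int) ≤ (t : Int) := by positivity
      omega), List.foldl_cons]
    have hsub : ((t : Int) + 1 - 1) = ((t : Nat) : Int) := by ring
    have hprev : (PySem.List.pyGet? (L.map (List.map some)) ((t : Int) + 1 - 1)).getD []
        = (L[t]'htL).map some := by
      rw [hsub, PySem.List.pyGet?_natCast, List.getElem?_map, List.getElem?_eq_getElem htL]
      rfl
    have htoNat : ((t : Int) + 1).toNat = t + 1 := by omega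
    have hlen1 : jn < (L[t + 1]'ht1L).length := by rw [hrows (t + 1) ht1L]; omega
    have hgi : ((L.map (List.map some)).getD ((t : Int) + 1).toNat []).getD ((jn : Int)).toNat none
        = some ((matrix.getD (t + 1) []).getD jn 0 + pvExcl (L[t]'htL) jn) := by
      rw [htoNat]
      have h1 : (L.map (List.map some)).getD (t + 1) [] = (L[t + 1]'ht1L).map some := by
        rw [List.getD_eq_getElem (L.map (List.map some)) [] (by simpa using ht1L)]
        simp
      rw [h1, show ((jn : Int)).toNat = jn from by omega]
      rw [List.getD_eq_getElem ((L[t + 1]'ht1L).map some) none (by simpa using hlen1)]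
      simp only [List.getElem_map]
      congr 1
      have h2 : (L[t + 1]'ht1L)[jn]'hlen1
          = ((List.range m).map (fun j => (matrix.getD (t + 1) []).getD j 0 + pvExcl (L[t]'htL) j))[jn]'(by simpa using hjn) := by
        congr 1
        exact hrel t ht1L
      rw [h2]
      simp
    have hfind := pv_backstep (L[t]'htL) (by omega) jn (by omega) ((matrix.getD ((t : Int) + 1).toNat []).getD ((jn : Int)).toNat 0)
    rw [hrowlen] at hfind
    set j' : Nat := if jn = (pvRowStats (L[t]'htL)).i1
        then ((pvRowStats (L[t]'htL)).i2).getD 0 else (pvRowStats (L[t]'htL)).i1 with hj'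
    have hj'lt : j' < m := by
      rw [hj']
      by_cases h : jn = (pvRowStats (L[t]'htL)).i1
      · rw [if_pos h, hi2]
        simpa [← hrowlen] using hwlt
      · rw [if_neg h]
        simpa [← hrowlen] using hi1lt
    simp only [List.foldl_cons]
    rw [hprev, hgi]
    rw [htoNat] at hfind ⊢
    rw [show ((jn : Int)).toNat = jn from by omega] at hfind ⊢
    rw [hfind]
    simp only []
    have htake : ((L.map pvRowStats).take (t + 1)).reverse
        = pvRowStats (L[t]'htL) :: ((L.map pvRowStats).take t).reverse := by
      rw [List.take_add_one]
      rw [List.getElem?_map, List.getElem?_eq_getElem htL]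
      simp
    rw [hsub, htake]
    simp only [pvTraj, List.map_cons]
    have H := ih j' (acc ++ [(jn : Int) + 1]) (by omega) hj'lt
    rw [List.append_assoc] at H
    exact H

-- ===== VERDICT (by name: the statement is the Claim_ definition above) =====
theorem optimal_planting_cost_spec : Claim_equal_optimal_planting_cost := by
  intro matrix _ hpre
  obtain ⟨hne, hm1len, _hge, hnm⟩ := hpre
  unfold Spec_optimal_planting_cost
  unfold optimal_planting_cost optimal_planting_cost_alt
  simp only []
  set F := matrix.headD [] with hF
  set m := F.length with hm
  set L : List (List Int) := F :: pvChain m F matrix.tail with hLdef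
  have hmat : F :: matrix.tail = matrix := by
    rw [hF]
    cases matrix with
    | nil => exact absurd rfl hne
    | cons a l => rfl
  have hlenm : matrix.length = matrix.tail.length + 1 := by
    conv_lhs => rw [← hmat]
    simp
  have hLlen : L.length = matrix.length := by
    show (F :: pvChain m F matrix.tail).length = matrix.length
    simp only [List.length_cons, pv_chain_length]
    omega
  have hLne : L ≠ [] := List.cons_ne_nil _ _
  have hrowsL : ∀ (i : Nat) (h : i < L.length), (L[i]'h).length = m := by
    intro i h
    match i with
    | 0 => rfl
    | i + 1 =>
      have h' : i < (pvChain m F matrix.tail).length := by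
        have := hLlen
        simp only [pv_chain_length] at this ⊢
        omega
      have hmem : (L[i + 1]'h) ∈ pvChain m F matrix.tail := by
        have heq : (L[i + 1]'h) = (pvChain m F matrix.tail)[i]'h' := rfl
        rw [heq]
        exact List.getElem_mem h'
      exact pv_chain_row_len m matrix.tail F _ hmem
  have hrelL : ∀ (i : Nat) (h : i + 1 < L.length),
      L[i + 1] = (List.range m).map (fun j => (matrix.getD (i + 1) []).getD j 0 + pvExcl (L[i]'(by omega)) j) := by
    intro i h
    have hgd : matrix.getD (i + 1) [] = matrix.tail.getD i [] := by
      conv_lhs => rw [← hmat]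
      rfl
    rw [hgd]
    exact pv_chain_rel m matrix.tail F i h
  have hm2L : 2 ≤ m ∨ L.length = 1 := by
    rcases hnm with h | h
    · right; omega
    · left; exact h
  -- A's forward table is the chain
  have hrow0 : (List.range m).map (fun j => some (F.getD j 0)) = F.map some := by
    have h1 : (List.range F.length).map (fun j => F.getD j 0) = F := by
      apply List.ext_getElem
      · simp
      · intro i h1 h2
        simp [List.getD_eq_getElem?_getD, List.getElem?_eq_getElem h2]
    have h2 := congrArg (List.map some) h1
    rw [List.map_map] at h2
    rw [hm]
    exact h2
  have hARows : pvARows matrix = L.map (List.map some) := by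
    unfold pvARows
    simp only []
    rw [show (matrix.headD [] : List Int) = F from rfl, ← hm]
    nth_rewrite 2 [show (1 : Int) = ((1 : Nat) : Int) from by simp]
    rw [pv_arows_fold matrix m (matrix.length - 1) 1 [(List.range m).map (fun j => some (F.getD j 0))] F
      (by omega) (by simp) (le_refl _) (by omega)
      (by rw [hrow0]; rfl) rfl
      (by intro h; rcases hnm with h' | h'; omega; exact h')]
    rw [hrow0, List.drop_one]
    rfl
  set lastRow := L.getLast hLne with hlastdef
  have hlastlen : lastRow.length = m := by
    rw [hlastdef, List.getLast_eq_getElem]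
    exact hrowsL _ _
  have hlastne : lastRow ≠ [] := by
    intro h; rw [h] at hlastlen; simp at hlastlen; omega
  have hlast : (L.map (List.map some)).getD (matrix.length - 1) [] = lastRow.map some := by
    have hidx : matrix.length - 1 < L.length := by omega
    rw [List.getD_eq_getElem (L.map (List.map some)) [] (by simpa using hidx), List.getElem_map]
    congr 1
    rw [hlastdef, List.getLast_eq_getElem]
    congr 1
    omega
  rw [hARows, hlast]
  -- the min_cost loop and .index
  have hmin := pv_mincost_fold lastRow hlastne
  rw [hlastlen] at hmin
  rw [hmin, pv_index_min lastRow hlastne]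
  simp only [Option.getD_some]
  -- A's backtracking loop
  obtain ⟨hi1lt, _, _, _⟩ := pv_stats_i1 lastRow hlastne
  rw [hlastlen] at hi1lt
  rw [show ((matrix.length : Int) - 1) = (((matrix.length - 1 : Nat) : Int)) from by omega]
  rw [pv_afold matrix m L hrowsL hrelL hm2L (matrix.length - 1) (pvRowStats lastRow).i1 [] (by omega) hi1lt]
  -- B's stats list is the mapped chain
  rw [pv_bloop_eq_chain, ← List.map_cons, ← hLdef]
  have hsl : (L.map pvRowStats).getLastD (pvRowStats F) = pvRowStats lastRow := by
    rw [List.getLastD_eq_getLast?, List.getLast?_map,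
      List.getLast?_eq_some_getLast hLne, hlastdef]
    rfl
  rw [hsl]
  -- B's backtracking loop
  rw [show ([((pvRowStats lastRow).i1 : Int) + 1] : List Int)
      = [] ++ [((pvRowStats lastRow).i1 : Int) + 1] from rfl]
  rw [pv_bfold ((L.map pvRowStats).dropLast.reverse) (pvRowStats lastRow).i1 []]
  rw [List.dropLast_eq_take, List.length_map, hLlen]
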